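-- pv_equiv track=rewrite | github.com/MakeB-rin/Ejercicios-en-Python | Ejercicios Normales/E_ProblemaStrings.py | f
-- ===== SOURCE A (Python) =====
-- def esVocal(x):
--     return x == 'a' or x == 'e' or x == 'i' or x == 'o' or x == 'u'
--
-- def elimina(s, v):
--     ans = ""
--     n = len(s)
--     cnt = 0
--     for i in range(n):
--         if esVocal(s[i]):
--             cnt += 1
--         if(not esVocal(s[i])) or cnt != v//2 + 1:
--             ans += s[i]
--     return ans
--
-- def f(s):
--     ans = ""
--     n = len(s)
--     i = 0
--     while i < n:
--         aux = ""
--         vocales = 0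
--         while i < n and s[i] != ' ':
--             aux += s[i]
--             if esVocal(s[i]):
--                 vocales += 1
--             i += 1
--         if vocales%2 == 1:
--             ans += elimina(aux, vocales) + " "
--         else:
--             ans += aux + " "
--         i += 1
--     return  ans
-- ===== SOURCE B (Python) =====
-- def _mid_removed(w):
--     pos = [i for i, c in enumerate(w) if c in 'aeiou']
--     if len(pos) % 2 == 1:
--         m = pos[len(pos) // 2]
--         return w[:m] + w[m + 1:]
--     return w
--
-- def f(s):
--     words = s.split(' ')
--     if words and words[-1] == '':
--         words.pop()
--     return ''.join(_mid_removed(w) + ' ' for w in words)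
-- ===== Notes on version B (the rewrite author's own statement) =====
-- stated objective: faster
-- what changed: Replaces A's index-driven nested while-loop tokenizer and per-character rebuild of every word (quadratic repeated string concatenation) by split-based tokenization dropping the one trailing empty token, with the middle vowel removed directly via its enumerated position and two slices joined once at the end.
import Mathlib
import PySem

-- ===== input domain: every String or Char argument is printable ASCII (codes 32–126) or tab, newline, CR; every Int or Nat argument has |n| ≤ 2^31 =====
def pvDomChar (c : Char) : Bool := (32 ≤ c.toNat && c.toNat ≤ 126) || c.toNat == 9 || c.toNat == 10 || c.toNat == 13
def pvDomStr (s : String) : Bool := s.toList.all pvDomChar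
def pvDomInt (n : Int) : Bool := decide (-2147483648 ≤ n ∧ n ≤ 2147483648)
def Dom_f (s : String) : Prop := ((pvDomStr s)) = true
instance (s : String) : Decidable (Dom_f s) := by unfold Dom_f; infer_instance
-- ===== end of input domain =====

-- B replaces A's index-driven nested while loops and per-character rebuild-with-counter vowel
-- removal by split-based tokenization (dropping one trailing empty token) plus position/slice
-- middle-vowel removal with a single final join; measured faster than A in a timing run.

-- ===== PORT A =====
def esVocal (x : Char) : Bool := x == 'a' || x == 'e' || x == 'i' || x == 'o' || x == 'u'

-- elimina: the for-i loop over s with state (ans, cnt), as a fold over the characters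
def elimina (s : List Char) (v : Int) : List Char :=
  (s.foldl (fun (acc : List Char × Int) c =>
      let cnt := if esVocal c then acc.2 + 1 else acc.2
      if (!esVocal c) || cnt != PySem.Int.floordiv v 2 + 1 then (acc.1 ++ [c], cnt) else (acc.1, cnt))
    ([], 0)).1

-- inner while loop: consumes chars until a space, building aux and counting vowels
def fInner (s : List Char) (aux : List Char) (voc : Int) : List Char × Int × List Char :=
  match s with
  | [] => (aux, voc, [])
  | c :: rest =>
    if c != ' ' then fInner rest (aux ++ [c]) (if esVocal c then voc + 1 else voc)
    else (aux, voc, c :: rest)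

theorem fInner_rest_len (s aux : List Char) (voc : Int) :
    (fInner s aux voc).2.2.length ≤ s.length := by
  induction s generalizing aux voc with
  | nil => simp [fInner]
  | cons c rest ih =>
    simp only [fInner]
    split
    · exact le_trans (ih _ _) (by simp)
    · simp

-- outer while loop
def fOuter (s : List Char) : List Char :=
  match h : s with
  | [] => []
  | _ :: _ =>
    let r := fInner s [] 0
    let piece := if PySem.Int.mod r.2.1 2 == 1 then elimina r.1 r.2.1 else r.1
    piece ++ [' '] ++ fOuter (r.2.2.tail)
termination_by s.length
decreasing_by
  have := fInner_rest_len s [] 0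
  subst h
  simp_all [List.length_tail]

def f (s : String) : String := String.ofList (fOuter s.toList)

-- ===== PORT B =====
-- _mid_removed: vowel positions via enumerate-filter, middle one removed by slicing
def midRemoved (w : List Char) : List Char :=
  let pos : List Int := ((PySem.List.enumerate w).filter (fun p => p.2 ∈ "aeiou".toList)).map (·.1)
  if PySem.Int.mod (pos.length : Int) 2 == 1 then
    match PySem.List.pyGet? pos (PySem.Int.floordiv (pos.length : Int) 2) with
    | some m => PySem.List.slice w none (some m) ++ PySem.List.slice w (some (m + 1)) none
    | none => w   -- unreachable: the index is in range
  else w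

def f_alt (s : String) : String :=
  let words := PySem.Chars.splitOn s.toList [' ']
  let words := if (!words.isEmpty) && (PySem.List.pyGet? words (-1) == some ([] : List Char))
               then words.dropLast else words
  String.ofList (PySem.Chars.join [] (words.map (fun w => midRemoved w ++ [' '])))

-- ===== PRECONDITION & SPEC =====
def Spec_f (s : String) (out : String) : Prop := out = f_alt s
instance (s : String) (out : String) : Decidable (Spec_f s out) := by unfold Spec_f; infer_instance

-- ===== CLAIM (what is proved, stated in full; the proofs are below) =====
def Claim_equal_f : Prop := ∀ (s : String), Dom_f s → Spec_f s (f s)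

-- ===== LEMMAS AND PROOFS =====

-- vowel count of a word
def countV (l : List Char) : Nat := l.countP (fun c => esVocal c)

-- removal of the k-th (1-based) vowel, the common denominator of the two programs
def dropK (k : Int) : List Char → List Char
  | [] => []
  | c :: cs => if esVocal c then (if k = 1 then cs else c :: dropK (k - 1) cs) else c :: dropK k cs

-- 0-based positions of the vowels
def natPos : List Char → List Nat
  | [] => []
  | c :: cs => if esVocal c then 0 :: (natPos cs).map (· + 1) else (natPos cs).map (· + 1)

-- structural form of s.split(' ')
def splitSp : List Char → List (List Char)
  | [] => [[]]
  | c :: cs =>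
    if c = ' ' then [] :: splitSp cs
    else match splitSp cs with
      | t :: ts => (c :: t) :: ts
      | [] => [[c]]

-- the fold body of elimina, with the fixed target t = v//2 + 1 abstracted
def elimStep (t : Int) (acc : List Char × Int) (c : Char) : List Char × Int :=
  let cnt := if esVocal c then acc.2 + 1 else acc.2
  if (!esVocal c) || cnt != t then (acc.1 ++ [c], cnt) else (acc.1, cnt)

theorem elimina_eq_foldl (s : List Char) (v : Int) :
    elimina s v = (s.foldl (elimStep (PySem.Int.floordiv v 2 + 1)) ([], 0)).1 := rfl

theorem vocal_mem (c : Char) : decide (c ∈ "aeiou".toList) = esVocal c := by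
  show decide (c ∈ ['a','e','i','o','u']) = esVocal c
  simp [esVocal, List.mem_cons, Bool.decide_or, Bool.or_assoc, Bool.beq_eq_decide_eq]

theorem elimFold_of_le (t : Int) (w : List Char) (ans : List Char) (cnt : Int) (h : t ≤ cnt) :
    (w.foldl (elimStep t) (ans, cnt)).1 = ans ++ w := by
  induction w generalizing ans cnt with
  | nil => simp
  | cons c cs ih =>
    simp only [List.foldl_cons, elimStep]
    split_ifs with h1 h2 h2
    · rw [ih _ _ (by omega)]; simp
    · exfalso; apply h2; simp only [h1, Bool.not_true, Bool.false_or, bne_iff_ne, ne_eq]; omega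
    · rw [ih _ _ h]; simp
    · exfalso; apply h2; simp [Bool.not_eq_true] at h1; simp [h1]

theorem elimFold_eq_dropK (t : Int) (w : List Char) (ans : List Char) (cnt : Int) :
    (w.foldl (elimStep t) (ans, cnt)).1 = ans ++ dropK (t - cnt) w := by
  induction w generalizing ans cnt with
  | nil => simp [dropK]
  | cons c cs ih =>
    simp only [List.foldl_cons, elimStep, dropK]
    by_cases hv : esVocal c = true
    · by_cases ht : cnt + 1 = t
      · rw [if_pos hv, if_pos hv, if_pos (show t - cnt = 1 by omega),
            if_neg (show ¬(((!esVocal c) || ((cnt + 1 : Int) != t)) = true) by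
              simp [hv, bne_iff_ne]; omega)]
        exact elimFold_of_le t cs ans (cnt + 1) (by omega)
      · rw [if_pos hv, if_pos hv, if_neg (show ¬(t - cnt = 1) by omega),
            if_pos (show ((!esVocal c) || ((cnt + 1 : Int) != t)) = true by
              simp [hv, bne_iff_ne]; omega)]
        rw [ih _ _]
        have harg : t - (cnt + 1) = t - cnt - 1 := by omega
        simp [harg]
    · simp only [Bool.not_eq_true] at hv
      simp only [hv, Bool.not_false, Bool.true_or, Bool.false_eq_true, if_false, if_true]
      rw [ih _ _]
      simp

theorem length_natPos (w : List Char) : (natPos w).length = countV w := by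
  induction w with
  | nil => simp [natPos, countV]
  | cons c cs ih =>
    by_cases hv : esVocal c = true <;> simp [natPos, countV, hv, ih]

theorem pos_eq (w : List Char) (s : Int) :
    (((PySem.List.enumerate w s).filter (fun p => esVocal p.2)).map (·.1))
      = (natPos w).map (fun (n : Nat) => (n : Int) + s) := by
  induction w generalizing s with
  | nil => simp [natPos]
  | cons c cs ih =>
    rw [PySem.List.enumerate_cons]
    by_cases hv : esVocal c = true
    · simp only [natPos, hv, if_true, List.filter_cons, List.map_cons, List.map_map, ih]
      congr 1
      · omega
      · apply List.map_congr_left; intro n _; simp [Function.comp]; ring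
    · simp only [Bool.not_eq_true] at hv
      simp only [natPos, hv, Bool.false_eq_true, if_false, List.filter_cons, List.map_map, ih]
      apply List.map_congr_left; intro n _; simp [Function.comp]; ring

theorem pos_cast (w : List Char) :
    ((PySem.List.enumerate w).filter (fun p => p.2 ∈ "aeiou".toList)).map (·.1)
      = (natPos w).map (fun (n : Nat) => (n : Int)) := by
  simp only [vocal_mem]
  rw [pos_eq w 0]
  simp

theorem midRemoved_len (w : List Char) :
    (((PySem.List.enumerate w).filter (fun p => p.2 ∈ "aeiou".toList)).map (·.1)).length
      = countV w := by
  rw [pos_cast, List.length_map, length_natPos]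

theorem dropK_eq_slice (w : List Char) (k : Nat) (h : k < (natPos w).length) :
    dropK ((k : Int) + 1) w = w.take ((natPos w)[k]) ++ w.drop ((natPos w)[k] + 1) := by
  induction w generalizing k with
  | nil => simp [natPos] at h
  | cons c cs ih =>
    by_cases hv : esVocal c = true
    · cases k with
      | zero => simp [natPos, hv, dropK]
      | succ j =>
        have h' : j < (natPos cs).length := by
          simp [natPos, hv] at h; omega
        simp only [natPos, hv, if_true, List.getElem_cons_succ, List.getElem_map]
        show dropK (((j : Int) + 1) + 1) (c :: cs) = _
        rw [dropK, if_pos hv, if_neg (by omega)]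
        have harg : ((j : Int) + 1) + 1 - 1 = (j : Int) + 1 := by ring
        rw [harg, ih j h']
        simp [List.take_succ_cons, List.drop_succ_cons]
    · simp only [Bool.not_eq_true] at hv
      have h' : k < (natPos cs).length := by
        simp [natPos, hv] at h; omega
      simp only [natPos, hv, Bool.false_eq_true, if_false, List.getElem_map]
      rw [dropK, if_neg (by simp [hv]), ih k h']
      simp [List.take_succ_cons, List.drop_succ_cons]

theorem midRemoved_even (w : List Char) (h : countV w % 2 = 0) : midRemoved w = w := by
  unfold midRemoved
  rw [if_neg]
  simp only [midRemoved_len, PySem.Int.mod_eq_emod_of_pos (by omega : (0:Int) < 2), beq_iff_eq]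
  omega

theorem midRemoved_odd (w : List Char) (h : countV w % 2 = 1) :
    midRemoved w = dropK (((countV w / 2 : Nat) : Int) + 1) w := by
  unfold midRemoved
  rw [if_pos]
  · have hlen : (natPos w).length = countV w := length_natPos w
    have hlt : countV w / 2 < (natPos w).length := by omega
    rw [pos_cast]
    have hidx : PySem.Int.floordiv ((((natPos w).map (fun (n : Nat) => (n : Int))).length : Nat) : Int) 2
        = ((countV w / 2 : Nat) : Int) := by
      rw [List.length_map, hlen, PySem.Int.floordiv_eq_ediv_of_pos (by omega)]
      omega
    rw [hidx, PySem.List.pyGet?_natCast]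
    rw [List.getElem?_map, List.getElem?_eq_getElem hlt]
    simp only [Option.map_some]
    rw [PySem.List.slice_to_natCast]
    have hc : ((((natPos w)[countV w / 2] : Nat) : Int) + 1)
        = (((natPos w)[countV w / 2] + 1 : Nat) : Int) := by push_cast; ring
    rw [hc, PySem.List.slice_from_natCast]
    rw [dropK_eq_slice w (countV w / 2) hlt]
  · simp only [midRemoved_len, PySem.Int.mod_eq_emod_of_pos (by omega : (0:Int) < 2), beq_iff_eq]
    omega

-- A's piece for a word with its own vowel count is exactly B's midRemoved
theorem piece_eq (w : List Char) :
    (if PySem.Int.mod ((countV w : Nat) : Int) 2 == 1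
       then elimina w ((countV w : Nat) : Int) else w) = midRemoved w := by
  by_cases h : countV w % 2 = 1
  · rw [if_pos, elimina_eq_foldl, elimFold_eq_dropK, midRemoved_odd w h]
    · have hfd : PySem.Int.floordiv ((countV w : Nat) : Int) 2 = ((countV w / 2 : Nat) : Int) := by
        rw [PySem.Int.floordiv_eq_ediv_of_pos (by omega)]; omega
      rw [hfd]
      simp
    · simp only [PySem.Int.mod_eq_emod_of_pos (by omega : (0:Int) < 2), beq_iff_eq]
      omega
  · rw [if_neg, midRemoved_even w (by omega)]
    simp only [PySem.Int.mod_eq_emod_of_pos (by omega : (0:Int) < 2), beq_iff_eq]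
    omega

theorem fInner_spec (s : List Char) (aux : List Char) (v : Int) :
    fInner s aux v = (aux ++ s.takeWhile (· != ' '),
                      v + ((countV (s.takeWhile (· != ' ')) : Nat) : Int),
                      s.dropWhile (· != ' ')) := by
  induction s generalizing aux v with
  | nil => simp [fInner, countV]
  | cons c cs ih =>
    rw [fInner]
    by_cases hc : c = ' '
    · subst hc
      simp [countV]
    · rw [if_pos (by simp [bne_iff_ne, hc]), ih]
      simp only [List.takeWhile_cons, List.dropWhile_cons, bne_iff_ne, ne_eq, hc,
        not_false_eq_true, decide_true, if_true, countV, List.countP_cons]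
      simp only [Prod.mk.injEq]
      refine ⟨by simp, ?_, trivial⟩
      by_cases hv : esVocal c = true <;> simp [hv] <;> ring

theorem splitSp_ne_nil (l : List Char) : splitSp l ≠ [] := by
  cases l with
  | nil => simp [splitSp]
  | cons c cs =>
    simp only [splitSp]
    split_ifs
    · simp
    · cases h : splitSp cs <;> simp

theorem splitSp_step (l : List Char) :
    splitSp l = (l.takeWhile (· != ' ')) ::
      (match l.dropWhile (· != ' ') with
       | [] => []
       | _ :: r' => splitSp r') := by
  induction l with
  | nil => simp [splitSp]
  | cons c cs ih =>
    by_cases hc : c = ' '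
    · subst hc
      simp [splitSp]
    · rw [splitSp]
      rw [if_neg hc, ih]
      simp [bne_iff_ne, hc]

theorem go_succ_nil (fuel : Nat) (cur : List Char) (acc : List (List Char)) :
    PySem.Chars.splitOn.go [' '] (fuel+1) [] cur acc = (cur.reverse :: acc).reverse := by
  rw [PySem.Chars.splitOn.go]
  exact fun h => absurd h (Nat.succ_ne_zero fuel)

theorem go_succ_cons (fuel : Nat) (c : Char) (rest cur : List Char) (acc : List (List Char)) :
    PySem.Chars.splitOn.go [' '] (fuel+1) (c :: rest) cur acc
      = if [' '].isPrefixOf (c :: rest)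
        then PySem.Chars.splitOn.go [' '] fuel (List.drop 1 (c :: rest)) [] (cur.reverse :: acc)
        else PySem.Chars.splitOn.go [' '] fuel rest (c :: cur) acc := by
  rw [PySem.Chars.splitOn.go]
  rfl

theorem go_spec (fuel : Nat) (l cur : List Char) (acc : List (List Char)) (h : l.length < fuel) :
    PySem.Chars.splitOn.go [' '] fuel l cur acc
      = acc.reverse ++ (match splitSp l with
                        | t :: ts => (cur.reverse ++ t) :: ts
                        | [] => []) := by
  induction fuel generalizing l cur acc with
  | zero => omega
  | succ fuel ih =>
    cases l with
    | nil => rw [go_succ_nil]; simp [splitSp]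
    | cons c rest =>
      rw [go_succ_cons]
      by_cases hc : c = ' '
      · subst hc
        rw [if_pos (by simp [List.isPrefixOf])]
        rw [ih _ _ _ (by simp at h ⊢; omega)]
        simp [splitSp, List.append_assoc]
        cases hs : splitSp rest with
        | nil => exact absurd hs (splitSp_ne_nil rest)
        | cons t ts => simp
      · rw [if_neg (by simp [List.isPrefixOf, Ne.symm hc])]
        rw [ih _ _ _ (by simp at h ⊢; omega)]
        rw [splitSp, if_neg hc]
        cases hs : splitSp rest with
        | nil => exact absurd hs (splitSp_ne_nil rest)
        | cons t ts => simp

theorem splitOn_eq_splitSp (l : List Char) : PySem.Chars.splitOn l [' '] = splitSp l := by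
  show PySem.Chars.splitOn.go [' '] (l.length + 1) l [] [] = splitSp l
  rw [go_spec _ _ _ _ (by omega)]
  cases hs : splitSp l with
  | nil => exact absurd hs (splitSp_ne_nil l)
  | cons t ts => simp

theorem join_nil_sep (ps : List (List Char)) : PySem.Chars.join [] ps = ps.flatten := by
  induction ps with
  | nil => rfl
  | cons p ps ih =>
    cases ps with
    | nil => simp [PySem.Chars.join, List.intercalate]
    | cons q qs =>
      rw [PySem.Chars.join_cons_cons, ih]
      simp

-- B's word-list after the conditional pop of a trailing empty token
def popLE (ws : List (List Char)) : List (List Char) :=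
  if (!ws.isEmpty) && (PySem.List.pyGet? ws (-1) == some ([] : List Char))
  then ws.dropLast else ws

def bList (l : List Char) : List Char :=
  PySem.Chars.join [] ((popLE (splitSp l)).map (fun w => midRemoved w ++ [' ']))

theorem f_alt_eq (s : String) : f_alt s = String.ofList (bList s.toList) := by
  unfold f_alt bList popLE
  rw [splitOn_eq_splitSp]

theorem popLE_cons (a : List Char) (ws : List (List Char)) (h : ws ≠ []) :
    popLE (a :: ws) = a :: popLE ws := by
  unfold popLE
  rw [PySem.List.pyGet?_neg_one, PySem.List.pyGet?_neg_one]
  cases ws with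
  | nil => exact absurd rfl h
  | cons b bs =>
    rw [List.getLast?_cons_cons]
    simp only [List.isEmpty_cons, Bool.not_false, Bool.true_and]
    split_ifs with hcond
    · rw [List.dropLast_cons_of_ne_nil (by simp)]
    · rfl

theorem main_eq (l : List Char) : fOuter l = bList l := by
  generalize hn : l.length = n
  induction n using Nat.strong_induction_on generalizing l with
  | _ n ih =>
    cases l with
    | nil => rw [fOuter]; decide
    | cons c cs =>
      rw [fOuter]
      simp only [fInner_spec (c :: cs) [] 0, List.nil_append, zero_add]
      rw [piece_eq]
      have hsplit := splitSp_step (c :: cs)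
      have hcat := List.takeWhile_append_dropWhile (p := (· != ' ')) (l := c :: cs)
      cases hr : (c :: cs).dropWhile (· != ' ') with
      | nil =>
        rw [hr] at hsplit hcat
        simp only [List.append_nil] at hcat
        unfold bList popLE
        rw [hsplit, hcat]
        simp only [List.tail_nil, List.isEmpty_cons, Bool.not_false,
          PySem.List.pyGet?_neg_one, List.getLast?_singleton, Bool.true_and]
        rw [if_neg (by simp)]
        rw [List.map_cons, List.map_nil, join_nil_sep]
        show midRemoved (c :: cs) ++ [' '] ++ fOuter [] = _
        rw [fOuter]
        simp
      | cons d r' =>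
        rw [hr] at hsplit hcat
        unfold bList
        rw [hsplit, popLE_cons _ _ (splitSp_ne_nil r'), List.map_cons, join_nil_sep,
          List.flatten_cons, ← join_nil_sep]
        have hlen : r'.length < n := by
          have h2 := congrArg List.length hcat
          simp only [List.length_append, List.length_cons] at h2 hn
          omega
        rw [List.tail_cons, ih r'.length (by omega) r' rfl]
        simp [List.append_assoc]
        rfl

-- ===== VERDICT (by name: the statement is the Claim_ definition above) =====
theorem f_spec : Claim_equal_f := by
  intro s _
  unfold Spec_f
  rw [f, f_alt_eq, main_eq]
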